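-- pv_equiv track=rewrite | github.com/RodrigoPombo1/Fundamentos-de-Programacao-Playground | Py06 Lists/Pattern hunting.py | pattern_hunting
-- ===== SOURCE A (Python) =====
-- def pattern_hunting(l1, l2, p):
--     result = []
--     for counter, element in enumerate(l1):
--         if check_pattern(element, p):
--             result.append(l2[counter])
--     for counter, element in enumerate(l2):
--         if check_pattern(element, p):
--             result.append(l1[counter])
--     result = sorted(result)
--     return result[::-1]
--
-- def check_pattern(string, pattern):
--     length_pattern = len(pattern)
--     length_string = len(string)
--     if length_string >= length_pattern:
--         current_char = 0
--         while current_char + length_pattern <= length_string: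
--             if string[current_char:current_char + length_pattern] == pattern:
--                 return True
--             current_char += 1
--     else:
--         return False
-- ===== SOURCE B (Python) =====
-- def pattern_hunting(l1, l2, p):
--     # bit-parallel shift-and matcher: per-character bitmasks built ONCE for p,
--     # then a single automaton-state pass over each string
--     m = len(p)
--     mask = {}
--     for i, ch in enumerate(p):
--         mask[ch] = mask.get(ch, 0) | (1 << i)
--     hit = 1 << (m - 1) if m else 0
--
--     def _match(s):
--         if m == 0:
--             return True
--         if len(s) < m:
--             return False
--         state = 0
--         for ch in s:
--             state = ((state << 1) | 1) & mask.get(ch, 0)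
--             if state & hit:
--                 return True
--         return False
--
--     result = [l2[i] for i, x in enumerate(l1) if _match(x)]
--     result += [l1[i] for i, y in enumerate(l2) if _match(y)]
--     result.sort(reverse=True)
--     return result
-- ===== Notes on version B (the rewrite author's own statement) =====
-- stated objective: alternative
-- what changed: Replaces the hand-written slice-and-compare substring scan by bit-parallel shift-and matching (per-character bitmasks built once for the pattern, then a single automaton-state pass over each string), and sorts once descending in place instead of sorting ascending and reversing.
import Mathlib
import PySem

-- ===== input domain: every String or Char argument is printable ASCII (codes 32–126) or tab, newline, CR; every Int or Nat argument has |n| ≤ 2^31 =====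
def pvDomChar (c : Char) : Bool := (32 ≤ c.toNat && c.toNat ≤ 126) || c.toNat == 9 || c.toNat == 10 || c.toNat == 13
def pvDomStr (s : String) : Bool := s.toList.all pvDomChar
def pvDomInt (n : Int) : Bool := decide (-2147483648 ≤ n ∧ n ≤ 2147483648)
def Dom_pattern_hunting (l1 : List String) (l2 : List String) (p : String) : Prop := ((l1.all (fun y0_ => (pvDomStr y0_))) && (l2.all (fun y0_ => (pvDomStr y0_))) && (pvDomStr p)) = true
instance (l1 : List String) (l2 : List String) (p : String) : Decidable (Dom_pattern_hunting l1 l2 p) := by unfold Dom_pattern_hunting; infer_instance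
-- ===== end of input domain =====

-- B replaces A's slice-and-compare substring scan by bit-parallel shift-and matching
-- (per-character bitmasks, one automaton-state pass per string) and sorts once
-- descending in place instead of sorting ascending and reversing.

-- ===== PORT A =====
-- check_pattern's while loop: current_char = c, loop while c + len(pattern) <= len(string)
def pvChkLoop (s p : List Char) (c : Nat) : Bool :=
  if c + p.length ≤ s.length then
    if PySem.List.slice s (some (c : Int)) (some ((c : Int) + (p.length : Int))) = p then
      true
    else
      pvChkLoop s p (c + 1)
  else
    false
termination_by s.length + 1 - c

-- check_pattern (falling off the while loop returns None → falsy, ported as false)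
def pattern_hunting_check (s p : String) : Bool :=
  if p.toList.length ≤ s.toList.length then pvChkLoop s.toList p.toList 0 else false

def pattern_hunting (l1 : List String) (l2 : List String) (p : String) : List String :=
  -- first loop: for counter, element in enumerate(l1): … result.append(l2[counter])
  let r1 : Option (List String) :=
    (PySem.List.enumerate l1 0).foldl
      (fun acc ce =>
        if pattern_hunting_check ce.2 p then
          acc.bind (fun r => (PySem.List.pyGet? l2 ce.1).map (fun v => r ++ [v]))
        else acc) (some [])
  -- second loop: for counter, element in enumerate(l2): … result.append(l1[counter])
  let r2 : Option (List String) :=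
    (PySem.List.enumerate l2 0).foldl
      (fun acc ce =>
        if pattern_hunting_check ce.2 p then
          acc.bind (fun r => (PySem.List.pyGet? l1 ce.1).map (fun v => r ++ [v]))
        else acc) r1
  match r2 with
  | some r => (PySem.List.slice? (PySem.List.sorted r (fun x => x) false) none none (-1)).getD []
  | none => []   -- IndexError: excluded by Pre_pattern_hunting

-- ===== PORT B =====
-- mask-building loop: for i, ch in enumerate(p): mask[ch] = mask.get(ch, 0) | (1 << i)
-- (mask/state values are nonnegative Python ints throughout; ported exactly as Nat)
def pvMask : List Char → Nat → PySem.Dict Char Nat → PySem.Dict Char Nat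
  | [], _, d => d
  | c :: cs, i, d => pvMask cs (i + 1) (d.insert c ((d.getD c 0) ||| (1 <<< i)))

-- text-scanning loop of _match: state = ((state << 1) | 1) & mask.get(ch, 0); early True on state & hit
def pvScan (mask : PySem.Dict Char Nat) (hit : Nat) : List Char → Nat → Bool
  | [], _ => false
  | c :: cs, st =>
    let st' := ((st <<< 1) ||| 1) &&& mask.getD c 0
    if st' &&& hit ≠ 0 then true else pvScan mask hit cs st'

-- _match (the closure: mask, hit and m are computed once per call)
def pvMatch (mask : PySem.Dict Char Nat) (hit m : Nat) (s : String) : Bool :=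
  if m = 0 then true
  else if s.toList.length < m then false
  else pvScan mask hit s.toList 0

-- the two list comprehensions with l2[i] / l1[i] lookups (none = IndexError)
def pvCollect (mask : PySem.Dict Char Nat) (hit m : Nat) : List String → List String → Nat → Option (List String)
  | [], _, _ => some []
  | x :: xs, other, i =>
    if pvMatch mask hit m x then
      match other[i]? with
      | some v => (pvCollect mask hit m xs other (i + 1)).map (fun r => v :: r)
      | none => none
    else pvCollect mask hit m xs other (i + 1)

def pattern_hunting_alt (l1 : List String) (l2 : List String) (p : String) : List String :=
  let m := p.toList.length
  let mask := pvMask p.toList 0 PySem.Dict.empty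
  let hit := if m = 0 then 0 else 1 <<< (m - 1)
  match pvCollect mask hit m l1 l2 0, pvCollect mask hit m l2 l1 0 with
  | some a, some b => PySem.List.sorted (a ++ b) (fun x => x) true
  | _, _ => []   -- IndexError: excluded by Pre_pattern_hunting

-- ===== PRECONDITION & SPEC =====
-- A raises IndexError exactly when some element containing the pattern sits at an index
-- with no counterpart in the other list; Pre_ excludes exactly those inputs (B raises there too).
def Pre_pattern_hunting (l1 : List String) (l2 : List String) (p : String) : Prop :=
  (∀ k (h : k < l1.length), PySem.Str.isIn p (l1[k]'h) = true → k < l2.length) ∧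
  (∀ k (h : k < l2.length), PySem.Str.isIn p (l2[k]'h) = true → k < l1.length)
instance (l1 : List String) (l2 : List String) (p : String) : Decidable (Pre_pattern_hunting l1 l2 p) := by unfold Pre_pattern_hunting; infer_instance
def pvWitness_pattern_hunting : List String × List String × String := (["ab", "x"], ["cd", "ya"], "a")

def Spec_pattern_hunting (l1 : List String) (l2 : List String) (p : String) (out : List String) : Prop := out = pattern_hunting_alt l1 l2 p
instance (l1 : List String) (l2 : List String) (p : String) (out : List String) : Decidable (Spec_pattern_hunting l1 l2 p out) := by unfold Spec_pattern_hunting; infer_instance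

-- ===== CLAIM (what is proved, stated in full; the proofs are below) =====
def Claim_equal_pattern_hunting : Prop := ∀ (l1 : List String) (l2 : List String) (p : String), Dom_pattern_hunting l1 l2 p → Pre_pattern_hunting l1 l2 p → Spec_pattern_hunting l1 l2 p (pattern_hunting l1 l2 p)

-- ===== LEMMAS AND PROOFS =====

-- A's while loop succeeds iff the pattern is a prefix of some in-range suffix at index ≥ c.
lemma pvChkLoop_iff (s p : List Char) (c : Nat) :
    pvChkLoop s p c = true ↔ ∃ j, c ≤ j ∧ j + p.length ≤ s.length ∧ p <+: s.drop j := by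
  induction c using pvChkLoop.induct (s := s) (p := p) with
  | case1 c hle hsl =>
    rw [pvChkLoop, if_pos hle, if_pos hsl]
    simp only [true_iff]
    refine ⟨c, le_refl c, hle, ?_⟩
    rw [PySem.List.slice_natCast_add] at hsl
    rw [← hsl]
    exact List.take_prefix _ _
  | case2 c hle hsl ih =>
    rw [pvChkLoop, if_pos hle, if_neg hsl]
    rw [ih]
    constructor
    · rintro ⟨j, hj, hjl, hp⟩; exact ⟨j, by omega, hjl, hp⟩
    · rintro ⟨j, hj, hjl, hp⟩
      rcases Nat.eq_or_lt_of_le hj with rfl | hlt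
      · exfalso; apply hsl
        rw [PySem.List.slice_natCast_add]
        exact (List.prefix_iff_eq_take.mp hp).symm
      · exact ⟨j, hlt, hjl, hp⟩
  | case3 c hle =>
    rw [pvChkLoop, if_neg hle]
    simp only [Bool.false_eq_true, false_iff]
    rintro ⟨j, hj, hjl, hp⟩
    omega

-- A's check_pattern is the substring test.
lemma chk_eq (s p : String) : pattern_hunting_check s p = PySem.Str.isIn p s := by
  have hiff := PySem.Chars.exists_prefix_drop_iff_isIn (sub := p.toList) (s := s.toList)
  have hIn : PySem.Str.isIn p s = PySem.Chars.isIn p.toList s.toList := by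
    simp [pysem]
  rw [pattern_hunting_check, hIn]
  by_cases hle : p.toList.length ≤ s.toList.length
  · rw [if_pos hle]
    rcases hb : PySem.Chars.isIn p.toList s.toList with _ | _
    · rw [Bool.eq_false_iff]
      intro hT
      rcases (pvChkLoop_iff _ _ 0).mp hT with ⟨j, _, _, hp⟩
      have hcontra : PySem.Chars.isIn p.toList s.toList = true := hiff.mp ⟨j, hp⟩
      rw [hb] at hcontra; exact Bool.false_ne_true hcontra
    · rcases hiff.mpr hb with ⟨j, hp⟩
      apply (pvChkLoop_iff s.toList p.toList 0).mpr
      by_cases hj : j ≤ s.toList.length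
      · refine ⟨j, Nat.zero_le j, ?_, hp⟩
        have h1 := hp.length_le
        rw [List.length_drop] at h1
        omega
      · have hnil : s.toList.drop j = [] := List.drop_eq_nil_of_le (by omega)
        rw [hnil] at hp
        have hp0 : p.toList = [] := List.prefix_nil.mp hp
        refine ⟨s.toList.length, Nat.zero_le _, by rw [hp0]; simp, ?_⟩
        rw [hp0]; exact List.nil_prefix
  · rw [if_neg hle]
    rcases hb : PySem.Chars.isIn p.toList s.toList with _ | _
    · rfl
    · exfalso
      rcases hiff.mpr hb with ⟨j, hp⟩
      have h1 := hp.length_le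
      rw [List.length_drop] at h1
      omega

-- A's enumerate/index loop collects, in order, the second components of the matching zip pairs.
lemma loop_eq (p : String) (la : List String) : ∀ (lb : List String) (c : Nat) (r : List String),
    (∀ k (h : k < la.length), PySem.Str.isIn p (la[k]'h) = true → c + k < lb.length) →
    (PySem.List.enumerate la (c : Int)).foldl
      (fun acc ce =>
        if pattern_hunting_check ce.2 p then
          acc.bind (fun rr => (PySem.List.pyGet? lb ce.1).map (fun v => rr ++ [v]))
        else acc) (some r)
    = some (r ++ ((la.zip (lb.drop c)).filter
        (fun xy => PySem.Str.isIn p xy.1)).map (fun xy => xy.2)) := by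
  induction la with
  | nil => intro lb c r h; simp [PySem.List.enumerate_nil]
  | cons x xs ih =>
    intro lb c r h
    simp only [chk_eq] at ih ⊢
    rw [PySem.List.enumerate_cons, List.foldl_cons]
    have hcast : (c : Int) + 1 = ((c + 1 : Nat) : Int) := by push_cast; ring
    rw [hcast]
    have h' : ∀ k (hk : k < xs.length), PySem.Str.isIn p (xs[k]'hk) = true → (c + 1) + k < lb.length := by
      intro k hk hm
      have := h (k + 1) (by simp; omega) (by simpa using hm)
      omega
    rcases hx : PySem.Str.isIn p x with _ | _
    · have hx2 : PySem.Chars.isIn p.toList x.toList = false := by simpa using hx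
      simp only [Bool.false_eq_true, if_false]
      rw [ih lb (c + 1) r h']
      congr 2
      by_cases hc : c < lb.length
      · rw [List.drop_eq_getElem_cons hc, List.zip_cons_cons, List.filter_cons]
        rw [if_neg (by simp [hx2])]
      · have h1 : lb.drop c = [] := List.drop_eq_nil_of_le (by omega)
        have h2 : lb.drop (c + 1) = [] := List.drop_eq_nil_of_le (by omega)
        rw [h1, h2, List.zip_nil_right, List.zip_nil_right]
    · have hx2 : PySem.Chars.isIn p.toList x.toList = true := by simpa using hx
      have hc : c < lb.length := by have := h 0 (by simp) (by simpa using hx); omega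
      have hget : PySem.List.pyGet? lb ((c : Nat) : Int) = some (lb[c]'hc) := by
        rw [PySem.List.pyGet?_natCast, List.getElem?_eq_getElem hc]
      simp only [if_true, hget, Option.bind_some, Option.map_some]
      rw [ih lb (c + 1) (r ++ [lb[c]'hc]) h']
      rw [List.drop_eq_getElem_cons hc, List.zip_cons_cons, List.filter_cons]
      rw [if_pos (by simp [hx2])]
      simp

-- reversing the ascending sort is the descending sort (equal keys are equal strings)
lemma rev_sorted (r : List String) :
    (PySem.List.sorted r (fun x => x) false).reverse = PySem.List.sorted r (fun x => x) true := by
  have h1 : PySem.List.sorted r (fun x => x) false = (PySem.List.sorted r (fun x => x) true).reverse := by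
    apply PySem.List.eq_of_perm_of_pairwise_le_of_injective (key := fun x => x)
        (fun a b hab => hab)
    · exact (PySem.List.sorted_perm r _ false).trans
        ((PySem.List.sorted_perm r (fun x => x) true).symm.trans (List.reverse_perm _).symm)
    · exact PySem.List.sorted_pairwise r (fun x => x)
    · rw [List.pairwise_reverse]
      exact PySem.List.sorted_pairwise_rev r (fun x => x)
  rw [h1, List.reverse_reverse]

-- ---- shift-and correctness ----

-- bit j of the mask entry for c is set iff p has c at position j - i (for positions added from i on)
lemma pvMask_bit (p : List Char) : ∀ (i : Nat) (d : PySem.Dict Char Nat) (c : Char) (j : Nat),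
    (((pvMask p i d).getD c 0).testBit j = true) ↔
      ((d.getD c 0).testBit j = true ∨ ∃ k, ∃ h : k < p.length, p[k] = c ∧ j = i + k) := by
  induction p with
  | nil => intro i d c j; simp [pvMask]
  | cons c' cs ih =>
    intro i d c j
    rw [pvMask, ih]
    rw [PySem.Dict.getD_insert]
    constructor
    · rintro (hbit | ⟨k, hk, hpk, rfl⟩)
      · by_cases hc : c = c'
        · rw [if_pos hc] at hbit
          rcases (by simpa using hbit : ((d.getD c' 0).testBit j || (1 <<< i).testBit j) = true) with h'
          rcases Bool.or_eq_true_iff.mp h' with h1 | h1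
          · subst hc; exact Or.inl h1
          · right
            have : j = i := by
              have := h1
              rw [Nat.testBit_shiftLeft] at this
              rcases Bool.and_eq_true_iff.mp this with ⟨hle, hbit1⟩
              have hle' : i ≤ j := by simpa using hle
              have : (1 : Nat).testBit (j - i) = true := hbit1
              rcases Nat.lt_or_ge 0 (j - i) with hpos | hz
              · rw [Nat.testBit_one_eq_true_iff_self_eq_zero] at this; omega
              · omega
            exact ⟨0, by simp, by simp [hc], by omega⟩
        · rw [if_neg hc] at hbit
          exact Or.inl hbit
      · exact Or.inr ⟨k + 1, by simpa using hk, by simpa using hpk, by omega⟩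
    · rintro (hbit | ⟨k, hk, hpk, rfl⟩)
      · left
        by_cases hc : c = c'
        · rw [if_pos hc]
          subst hc
          simp only [Nat.testBit_or]
          rw [hbit]; rfl
        · rw [if_neg hc]; exact hbit
      · rcases k with _ | k'
        · -- position 0: bit i of the freshly inserted mask entry
          left
          have hcc : c = c' := by simpa using hpk.symm
          rw [if_pos hcc]
          simp only [Nat.testBit_or]
          have : (1 <<< i).testBit (i + 0) = true := by
            rw [Nat.testBit_shiftLeft]
            simp
          rw [this]; simp
        · right
          exact ⟨k', by simpa using hk, by simpa using hpk, by omega⟩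

lemma pvMask_bit0 (p : List Char) (c : Char) (j : Nat) :
    (((pvMask p 0 PySem.Dict.empty).getD c 0).testBit j = true) ↔
      ∃ h : j < p.length, p[j] = c := by
  rw [pvMask_bit]
  simp only [PySem.Dict.getD_empty, Nat.zero_testBit, Bool.false_eq_true, false_or]
  constructor
  · rintro ⟨k, hk, hpk, rfl⟩; exact ⟨by simpa using hk, by simpa using hpk⟩
  · rintro ⟨hj, hpj⟩; exact ⟨j, hj, hpj, by omega⟩

-- one step of the automaton
lemma pvStep_bit (p : List Char) (st : Nat) (c : Char) (j : Nat) :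
    ((((st <<< 1) ||| 1) &&& (pvMask p 0 PySem.Dict.empty).getD c 0).testBit j = true) ↔
      ((j = 0 ∨ st.testBit (j - 1) = true) ∧ ∃ h : j < p.length, p[j] = c) := by
  rw [Nat.testBit_and, Bool.and_eq_true_iff, pvMask_bit0]
  constructor
  · rintro ⟨h1, h2⟩
    refine ⟨?_, h2⟩
    rw [Nat.testBit_or, Bool.or_eq_true_iff] at h1
    rcases h1 with h1 | h1
    · rw [Nat.testBit_shiftLeft] at h1
      rcases Bool.and_eq_true_iff.mp h1 with ⟨hle, hb⟩
      have : 1 ≤ j := by simpa using hle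
      right; exact hb
    · left
      rcases Nat.lt_or_ge 0 j with hpos | hz
      · rw [Nat.testBit_one_eq_true_iff_self_eq_zero] at h1; omega
      · omega
  · rintro ⟨h1, h2⟩
    refine ⟨?_, h2⟩
    rw [Nat.testBit_or, Bool.or_eq_true_iff]
    rcases Nat.eq_zero_or_pos j with rfl | hjpos
    · right; decide
    · left
      rw [Nat.testBit_shiftLeft]
      rcases h1 with h0 | h1
      · omega
      · have hle : 1 ≤ j := hjpos
        simp [hle, h1]

-- suffix of a snoc
lemma suffix_concat_concat {α : Type} (l t : List α) (a c : α) :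
    l ++ [a] <:+ t ++ [c] ↔ a = c ∧ l <:+ t := by
  constructor
  · rintro ⟨u, hu⟩
    rw [← List.append_assoc, ← List.concat_eq_append, ← List.concat_eq_append] at hu
    rcases List.concat_inj.mp hu with ⟨h1, h2⟩
    exact ⟨h2, ⟨u, h1⟩⟩
  · rintro ⟨rfl, u, hu⟩
    exact ⟨u, by rw [← List.append_assoc, hu]⟩

-- nonzero test against the single hit bit
lemma and_hit_ne_zero (st m : Nat) (_hm : 0 < m) :
    (st &&& (1 <<< (m - 1)) ≠ 0) ↔ st.testBit (m - 1) = true := by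
  have hpow : (1 : Nat) <<< (m - 1) = 2 ^ (m - 1) := by
    rw [Nat.shiftLeft_eq, one_mul]
  rw [hpow, Nat.and_two_pow]
  rcases hb : st.testBit (m - 1) with _ | _
  · simp
  · simp

-- the scanning loop finds the pattern iff it ends at some processed position
lemma pvScan_iff (p : List Char) (hp : p ≠ []) :
    ∀ (rest t : List Char) (st : Nat),
      (∀ j, st.testBit j = true ↔ (j < p.length ∧ p.take (j + 1) <:+ t)) →
      (pvScan (pvMask p 0 PySem.Dict.empty) (1 <<< (p.length - 1)) rest st = true ↔
        ∃ i, i < rest.length ∧ p <:+ t ++ rest.take (i + 1)) := by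
  intro rest
  induction rest with
  | nil => intro t st _; simp [pvScan]
  | cons c cs ih =>
    intro t st hst
    have hm : 0 < p.length := List.length_pos_iff.mpr hp
    rw [pvScan]
    set st' := ((st <<< 1) ||| 1) &&& (pvMask p 0 PySem.Dict.empty).getD c 0 with hst'def
    have hst' : ∀ j, st'.testBit j = true ↔ (j < p.length ∧ p.take (j + 1) <:+ t ++ [c]) := by
      intro j
      rw [hst'def, pvStep_bit]
      constructor
      · rintro ⟨h1, hj, hpj⟩
        refine ⟨hj, ?_⟩
        have htake : p.take (j + 1) = p.take j ++ [p[j]] := by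
          rw [List.take_add_one, List.getElem?_eq_getElem hj]; rfl
        rw [htake, hpj, suffix_concat_concat]
        refine ⟨rfl, ?_⟩
        rcases Nat.eq_zero_or_pos j with rfl | hjpos
        · simp
        · rcases h1 with h0 | h1
          · omega
          · have := (hst (j - 1)).mp h1
            have heq : j - 1 + 1 = j := by omega
            rw [heq] at this
            exact this.2
      · rintro ⟨hj, hsuf⟩
        have htake : p.take (j + 1) = p.take j ++ [p[j]] := by
          rw [List.take_add_one, List.getElem?_eq_getElem hj]; rfl
        rw [htake, suffix_concat_concat] at hsuf
        refine ⟨?_, hj, hsuf.1⟩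
        rcases Nat.eq_zero_or_pos j with rfl | hjpos
        · exact Or.inl rfl
        · right
          apply (hst (j - 1)).mpr
          have heq : j - 1 + 1 = j := by omega
          rw [heq]
          exact ⟨by omega, hsuf.2⟩
    by_cases hhit : st' &&& (1 <<< (p.length - 1)) ≠ 0
    · rw [if_pos hhit]
      simp only [true_iff]
      have hb := (and_hit_ne_zero st' p.length hm).mp hhit
      have := (hst' (p.length - 1)).mp hb
      have heq : p.length - 1 + 1 = p.length := by omega
      rw [heq, List.take_length] at this
      exact ⟨0, by simp, by simpa using this.2⟩
    · rw [if_neg hhit]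
      have hnohit : ¬ p <:+ t ++ [c] := by
        intro hcon
        apply hhit
        apply (and_hit_ne_zero st' p.length hm).mpr
        apply (hst' (p.length - 1)).mpr
        have heq : p.length - 1 + 1 = p.length := by omega
        rw [heq, List.take_length]
        exact ⟨by omega, hcon⟩
      rw [ih (t ++ [c]) st' hst']
      constructor
      · rintro ⟨i, hi, hsuf⟩
        refine ⟨i + 1, by simpa using hi, ?_⟩
        simpa [List.append_assoc] using hsuf
      · rintro ⟨i, hi, hsuf⟩
        rcases i with _ | i'
        · exact absurd (by simpa using hsuf) hnohit
        · refine ⟨i', by simpa using hi, ?_⟩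
          simpa [List.append_assoc] using hsuf

-- B's _match is the substring test.
lemma pvMatch_eq (s p : String) :
    pvMatch (pvMask p.toList 0 PySem.Dict.empty)
      (if p.toList.length = 0 then 0 else 1 <<< (p.toList.length - 1))
      p.toList.length s = PySem.Str.isIn p s := by
  rw [pvMatch]
  by_cases hz : p.toList.length = 0
  · have hp0 : p.toList = [] := List.length_eq_zero_iff.mp hz
    rw [if_pos hz]
    have : PySem.Str.isIn p s = PySem.Chars.isIn p.toList s.toList := by simp [pysem]
    rw [this, hp0, PySem.Chars.isIn_nil]
  · rw [if_neg hz, if_neg hz]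
    have hp : p.toList ≠ [] := fun h => hz (by rw [h]; rfl)
    by_cases hshort : s.toList.length < p.toList.length
    · rw [if_pos hshort]
      rcases hb : PySem.Str.isIn p s with _ | _
      · rfl
      · exfalso
        have hinf := (PySem.Str.isIn_iff_infix p s).mp hb
        have := hinf.length_le
        omega
    · rw [if_neg hshort]
      have hinit : ∀ j, (0 : Nat).testBit j = true ↔
          (j < p.toList.length ∧ p.toList.take (j + 1) <:+ ([] : List Char)) := by
        intro j
        simp only [Nat.zero_testBit, Bool.false_eq_true, false_iff]
        rintro ⟨hj, hsuf⟩
        have := List.suffix_nil.mp hsuf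
        have : p.toList.take (j + 1) ≠ [] := by
          apply List.ne_nil_of_length_pos
          rw [List.length_take]
          omega
        exact this (List.suffix_nil.mp hsuf)
      have hiff := pvScan_iff p.toList hp s.toList [] 0 hinit
      rcases hb : PySem.Str.isIn p s with _ | _
      · rw [Bool.eq_false_iff]
        intro hT
        rcases hiff.mp hT with ⟨i, hi, hsuf⟩
        have hinf : p.toList <:+: s.toList :=
          hsuf.isInfix.trans (by simpa using (List.take_prefix (i + 1) s.toList).isInfix)
        rw [← PySem.Str.isIn_iff_infix] at hinf
        rw [hb] at hinf; exact Bool.false_ne_true hinf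
      · apply hiff.mpr
        rcases (PySem.Str.isIn_iff_infix p s).mp hb with ⟨u, v, huv⟩
        refine ⟨u.length + p.toList.length - 1, ?_, ?_⟩
        · have : u.length + p.toList.length + v.length = s.toList.length := by
            rw [← huv]; simp only [List.length_append]
          have hpl : 0 < p.toList.length := List.length_pos_iff.mpr hp
          omega
        · have hpl : 0 < p.toList.length := List.length_pos_iff.mpr hp
          have heq : u.length + p.toList.length - 1 + 1 = u.length + p.toList.length := by omega
          rw [heq]
          have hpre : u ++ p.toList <+: s.toList := ⟨v, by rw [← huv]⟩
          have htake : s.toList.take (u.length + p.toList.length) = u ++ p.toList := by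
            have h2 := (List.prefix_iff_eq_take.mp hpre).symm
            have hlen : (u ++ p.toList).length = u.length + p.toList.length := by simp
            rw [← hlen]
            exact h2
          simp only [List.nil_append]
          rw [htake]
          exact List.suffix_append u p.toList

-- B's comprehension collects the second components of the matching zip pairs.
lemma pvCollect_eq (p : String) (la : List String) : ∀ (lb : List String) (i : Nat),
    (∀ k (h : k < la.length), PySem.Str.isIn p (la[k]'h) = true → i + k < lb.length) →
    pvCollect (pvMask p.toList 0 PySem.Dict.empty)
        (if p.toList.length = 0 then 0 else 1 <<< (p.toList.length - 1))
        p.toList.length la lb i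
      = some (((la.zip (lb.drop i)).filter
          (fun xy => PySem.Str.isIn p xy.1)).map (fun xy => xy.2)) := by
  induction la with
  | nil => intro lb i h; simp [pvCollect]
  | cons x xs ih =>
    intro lb i h
    rw [pvCollect, pvMatch_eq]
    have h' : ∀ k (hk : k < xs.length), PySem.Str.isIn p (xs[k]'hk) = true → (i + 1) + k < lb.length := by
      intro k hk hm
      have := h (k + 1) (by simp; omega) (by simpa using hm)
      omega
    rcases hx : PySem.Str.isIn p x with _ | _
    · have hx2 : PySem.Chars.isIn p.toList x.toList = false := by simpa using hx
      simp only [Bool.false_eq_true, if_false]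
      rw [ih lb (i + 1) h']
      congr 2
      by_cases hc : i < lb.length
      · rw [List.drop_eq_getElem_cons hc, List.zip_cons_cons, List.filter_cons]
        rw [if_neg (by simp [hx2])]
      · have h1 : lb.drop i = [] := List.drop_eq_nil_of_le (by omega)
        have h2 : lb.drop (i + 1) = [] := List.drop_eq_nil_of_le (by omega)
        rw [h1, h2, List.zip_nil_right, List.zip_nil_right]
    · have hx2 : PySem.Chars.isIn p.toList x.toList = true := by simpa using hx
      simp only [if_true]
      have hc : i < lb.length := by have := h 0 (by simp) (by simpa using hx); omega
      rw [List.getElem?_eq_getElem hc]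
      rw [ih lb (i + 1) h']
      rw [List.drop_eq_getElem_cons hc, List.zip_cons_cons, List.filter_cons]
      rw [if_pos (by simp [hx2])]
      simp

-- ===== VERDICT (by name: the statement is the Claim_ definition above) =====
theorem pattern_hunting_spec : Claim_equal_pattern_hunting := by
  intro l1 l2 p _hdom hpre
  obtain ⟨h1, h2⟩ := hpre
  unfold Spec_pattern_hunting pattern_hunting pattern_hunting_alt
  dsimp only
  have hz : (0 : Int) = ((0 : Nat) : Int) := by simp
  rw [hz]
  rw [loop_eq p l1 l2 0 [] (by intro k hk hm; have := h1 k hk hm; omega)]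
  rw [loop_eq p l2 l1 0 _ (by intro k hk hm; have := h2 k hk hm; omega)]
  rw [pvCollect_eq p l1 l2 0 (by intro k hk hm; have := h1 k hk hm; omega)]
  rw [pvCollect_eq p l2 l1 0 (by intro k hk hm; have := h2 k hk hm; omega)]
  simp only [List.drop_zero, List.nil_append]
  rw [PySem.List.slice?_none_none_neg_one, Option.getD_some]
  rw [rev_sorted]
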